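-- pv_equiv track=rewrite | github.com/DEENUU1/fjob | fjob/scrapers/pracujpl.py | check_work_mode
-- ===== SOURCE A (Python) =====
-- from typing import Dict, List, Optional
--
-- def check_work_mode(datas: List[str]):
--     """Check if hybrid or remote work mode are available."""
--     is_hybrid = False
--     is_remote = False
--
--     for data in datas:
--         if "zdalna" in data:
--             is_remote = True
--         elif "hybrydowa" in data:
--             is_hybrid = True
--
--     return is_hybrid, is_remote
-- ===== SOURCE B (Python) =====
-- def check_work_mode(datas):
--     """Check if hybrid or remote work mode are available."""
--     is_remote = any("zdalna" in d for d in datas)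
--     is_hybrid = any("hybrydowa" in d and "zdalna" not in d for d in datas)
--     return is_hybrid, is_remote
-- ===== Notes on version B (the rewrite author's own statement) =====
-- stated objective: simpler
-- what changed: Replaces the single stateful loop with two independent any() reductions, one per flag; the hybrid scan carries the 'zdalna' not in d guard that the original elif implies.
import Mathlib
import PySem

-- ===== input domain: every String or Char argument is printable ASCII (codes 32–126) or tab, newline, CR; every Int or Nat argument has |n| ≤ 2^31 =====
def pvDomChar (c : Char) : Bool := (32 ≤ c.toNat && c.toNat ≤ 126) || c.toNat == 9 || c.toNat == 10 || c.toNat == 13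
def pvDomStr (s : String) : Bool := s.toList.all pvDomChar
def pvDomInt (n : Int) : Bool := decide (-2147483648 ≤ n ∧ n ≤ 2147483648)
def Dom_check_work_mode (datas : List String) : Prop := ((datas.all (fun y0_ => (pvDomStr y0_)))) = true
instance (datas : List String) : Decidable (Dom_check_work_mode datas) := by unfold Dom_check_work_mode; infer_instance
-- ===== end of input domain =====

-- B replaces A's single stateful loop with two independent any-scans (objective: simpler).

-- ===== PORT A =====
def check_work_mode (datas : List String) : Bool × Bool :=
  -- literal port of A: one loop carrying (is_hybrid, is_remote)
  let st := datas.foldl (fun (acc : Bool × Bool) data =>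
    if PySem.Str.isIn "zdalna" data then (acc.1, true)
    else if PySem.Str.isIn "hybrydowa" data then (true, acc.2)
    else acc) (false, false)
  st

-- ===== PORT B =====
def check_work_mode_alt (datas : List String) : Bool × Bool :=
  -- port of B: two independent any-scans
  let is_remote := datas.any (fun d => PySem.Str.isIn "zdalna" d)
  let is_hybrid := datas.any (fun d => PySem.Str.isIn "hybrydowa" d && !PySem.Str.isIn "zdalna" d)
  (is_hybrid, is_remote)

-- ===== PRECONDITION & SPEC =====
def Spec_check_work_mode (datas : List String) (out : Bool × Bool) : Prop := out = check_work_mode_alt datas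
instance (datas : List String) (out : Bool × Bool) : Decidable (Spec_check_work_mode datas out) := by unfold Spec_check_work_mode; infer_instance

-- ===== CLAIM (what is proved, stated in full; the proofs are below) =====
def Claim_equal_check_work_mode : Prop := ∀ (datas : List String), Dom_check_work_mode datas → Spec_check_work_mode datas (check_work_mode datas)

-- ===== LEMMAS AND PROOFS =====
-- loop invariant (abstract predicates avoid unfolding isIn): after processing xs from state (h, r),
-- the state equals the two scans or-ed in
theorem cwm_fold {p q : String → Bool} (xs : List String) (h r : Bool) :
    xs.foldl (fun (acc : Bool × Bool) data =>
      if p data then (acc.1, true)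
      else if q data then (true, acc.2)
      else acc) (h, r)
    = (h || xs.any (fun d => q d && !p d), r || xs.any (fun d => p d)) := by
  induction xs generalizing h r with
  | nil => simp
  | cons x xs ih =>
    simp only [List.foldl_cons, List.any_cons]
    by_cases hz : p x <;> by_cases hh : q x <;>
      simp [hz, hh, ih, Bool.or_assoc, Bool.or_comm, Bool.or_left_comm]

-- ===== VERDICT (by name: the statement is the Claim_ definition above) =====
theorem check_work_mode_spec : Claim_equal_check_work_mode := by
  intro datas _
  unfold Spec_check_work_mode check_work_mode check_work_mode_alt
  simpa using cwm_fold datas false false
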